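-- pv_equiv track=rewrite | github.com/CN-UPB/pg-scrambLe | src/translator/translator.py | append_dict
-- ===== SOURCE A (Python) =====
-- def append_dict(parent_key, lvl, dictionary):
--     '''
--     reads a parent key , a list of values that should be mapped to the parent key and an empty dictionary
--     to contain the result.
--
--     Params
--     ------
--     parent_key : str
--         contains the key which is to be assigned a value
--     lvl : list
--         contains an array of items which needs to be transformed properly before assigning to the key
--    dictionary : dict
--         empty dictionary for the result
--
--     Returns
--     -------
--     dict
--         returns a full dictionary containing a key and a value which is another dictionary
--
--     '''
--     inner_dict = {}
--     list_dict = []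
--
--     k, v = lvl[0][1].split(' : ')
--     inner_dict.update({k: v})
--
--     for i in range(1, len(lvl)):
--
--         if (lvl[i - 1][0] == lvl[i][0]):
--             k, v = lvl[i][1].split(' : ')
--             inner_dict.update({k: v})
--
--         elif (lvl[i - 1][0] != lvl[i][0]):
--             list_dict.append(inner_dict)
--             inner_dict = {}
--             k, v = lvl[i][1].split(' : ')
--             inner_dict.update({k: v})
--
--     list_dict.append(inner_dict)
--     dictionary[parent_key] = list_dict
--
--     return dictionary
-- ===== SOURCE B (Python) =====
-- def append_dict(parent_key, lvl, dictionary):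
--     """Two-pointer run scan: find each maximal run of equal first elements,
--     build its inner dict in one comprehension, append; then store under parent_key."""
--     list_dict = []
--     i, n = 0, len(lvl)
--     while i < n:
--         key = lvl[i][0]
--         j = i + 1
--         while j < n and lvl[j][0] == key:
--             j += 1
--         inner = {}
--         for _, s in lvl[i:j]:
--             k, v = s.split(' : ')
--             inner[k] = v
--         list_dict.append(inner)
--         i = j
--     dictionary[parent_key] = list_dict
--     return dictionary
-- ===== Notes on version B (the rewrite author's own statement) =====
-- stated objective: alternative
-- what changed: Replaces A's single pass that compares each item with its predecessor and resets an accumulator dict with a two-pointer scan that delimits each maximal run of equal keys first and then builds that run's inner dict in one inner loop.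
import Mathlib
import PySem

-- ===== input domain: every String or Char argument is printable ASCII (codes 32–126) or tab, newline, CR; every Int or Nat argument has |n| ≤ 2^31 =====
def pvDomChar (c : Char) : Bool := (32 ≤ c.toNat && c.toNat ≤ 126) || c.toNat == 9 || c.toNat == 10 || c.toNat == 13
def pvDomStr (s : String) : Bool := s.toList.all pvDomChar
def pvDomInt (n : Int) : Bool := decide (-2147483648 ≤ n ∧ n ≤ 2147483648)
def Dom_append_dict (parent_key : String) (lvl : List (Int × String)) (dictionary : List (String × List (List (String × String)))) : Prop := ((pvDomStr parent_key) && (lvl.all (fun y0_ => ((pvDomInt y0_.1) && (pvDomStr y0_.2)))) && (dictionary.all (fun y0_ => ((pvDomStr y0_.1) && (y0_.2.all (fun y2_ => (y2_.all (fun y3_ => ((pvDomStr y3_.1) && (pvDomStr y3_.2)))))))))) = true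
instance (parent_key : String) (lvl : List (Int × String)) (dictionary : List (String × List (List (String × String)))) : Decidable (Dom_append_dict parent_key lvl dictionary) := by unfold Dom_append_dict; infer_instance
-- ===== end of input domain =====

-- B replaces A's predecessor-compare single pass with a two-pointer run scan (delimit each
-- maximal run of equal keys, then build its inner dict); same return value; both mutate
-- `dictionary` identically in Python (the proof is about the return value).


-- ===== PORT A =====
-- shared helper: `k, v = s.split(' : ')` (under Pre_ the split has exactly 2 parts;
-- otherwise Python raises ValueError, excluded by Pre_, value here irrelevant)
def kvOf (s : String) : String × String :=
  match PySem.Str.split? s " : " with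
  | some [k, v] => (k, v)
  | _ => ("", "")

-- `d[k] = v` on a dict represented as its association list
def insKV (d : List (String × String)) (k v : String) : List (String × String) :=
  (PySem.Dict.insert (PySem.Dict.mk d) k v).items

def insOuter (d : List (String × List (List (String × String)))) (k : String)
    (v : List (List (String × String))) : List (String × List (List (String × String))) :=
  (PySem.Dict.insert (PySem.Dict.mk d) k v).items

-- A's `for i in range(1, len(lvl))` loop: `prevKey` is lvl[i-1][0], `rest` the items from i on
def loopA (prevKey : Int) (rest : List (Int × String)) (inner : List (String × String))
    (listd : List (List (String × String))) : List (List (String × String)) :=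
  match rest with
  | [] => listd ++ [inner]
  | (key, s) :: rest' =>
      if prevKey == key then
        loopA key rest' (insKV inner (kvOf s).1 (kvOf s).2) listd
      else
        loopA key rest' (insKV [] (kvOf s).1 (kvOf s).2) (listd ++ [inner])

def append_dict (parent_key : String) (lvl : List (Int × String)) (dictionary : List (String × List (List (String × String)))) : List (String × List (List (String × String))) :=
  match lvl with
  | [] => dictionary   -- Python raises IndexError at lvl[0]; excluded by Pre_
  | (key, s) :: rest =>
      insOuter dictionary parent_key (loopA key rest (insKV [] (kvOf s).1 (kvOf s).2) [])

-- ===== PORT B =====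
-- B's outer while loop: take the maximal run of items whose key equals the head's key
-- (the inner `while j < n and lvl[j][0] == key` scan), build its inner dict, recurse on the rest
def altBuild (lvl : List (Int × String)) : List (List (String × String)) :=
  match lvl with
  | [] => []
  | (key, s) :: rest =>
      let run := (key, s) :: rest.takeWhile (fun p => p.1 == key)
      let inner := run.foldl (fun acc p => insKV acc (kvOf p.2).1 (kvOf p.2).2) []
      inner :: altBuild (rest.dropWhile (fun p => p.1 == key))
termination_by lvl.length
decreasing_by
  exact Nat.lt_of_le_of_lt (List.length_dropWhile_le _ _) (by simp)

def append_dict_alt (parent_key : String) (lvl : List (Int × String)) (dictionary : List (String × List (List (String × String)))) : List (String × List (List (String × String))) :=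
  insOuter dictionary parent_key (altBuild lvl)

-- ===== PRECONDITION & SPEC =====
-- Pre_ excludes exactly the inputs where A raises: empty lvl (IndexError on lvl[0]) and any
-- item whose string does not split by ' : ' into exactly two parts (ValueError on unpacking).
def Pre_append_dict (parent_key : String) (lvl : List (Int × String)) (dictionary : List (String × List (List (String × String)))) : Prop :=
  lvl ≠ [] ∧ ∀ p ∈ lvl, ((PySem.Str.split? p.2 " : ").getD []).length = 2
instance (parent_key : String) (lvl : List (Int × String)) (dictionary : List (String × List (List (String × String)))) : Decidable (Pre_append_dict parent_key lvl dictionary) := by unfold Pre_append_dict; infer_instance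

def pvWitness_append_dict : String × (List (Int × String)) × (List (String × List (List (String × String)))) :=
  ("vdu", [(1, "a : 1"), (1, "b : 2"), (2, "a : 3")], [])

def Spec_append_dict (parent_key : String) (lvl : List (Int × String)) (dictionary : List (String × List (List (String × String)))) (out : List (String × List (List (String × String)))) : Prop := out = append_dict_alt parent_key lvl dictionary
instance (parent_key : String) (lvl : List (Int × String)) (dictionary : List (String × List (List (String × String)))) (out : List (String × List (List (String × String)))) : Decidable (Spec_append_dict parent_key lvl dictionary out) := by unfold Spec_append_dict; infer_instance

-- ===== CLAIM (what is proved, stated in full; the proofs are below) =====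
def Claim_equal_append_dict : Prop := ∀ (parent_key : String) (lvl : List (Int × String)) (dictionary : List (String × List (List (String × String)))), Dom_append_dict parent_key lvl dictionary → Pre_append_dict parent_key lvl dictionary → Spec_append_dict parent_key lvl dictionary (append_dict parent_key lvl dictionary)

-- ===== LEMMAS AND PROOFS =====
theorem altBuild_nil : altBuild [] = [] := by unfold altBuild; rfl

theorem altBuild_cons (key : Int) (s : String) (rest : List (Int × String)) :
    altBuild ((key, s) :: rest) =
      (((key, s) :: rest.takeWhile (fun p => p.1 == key)).foldl
          (fun acc p => insKV acc (kvOf p.2).1 (kvOf p.2).2) [])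
        :: altBuild (rest.dropWhile (fun p => p.1 == key)) := by
  conv_lhs => unfold altBuild

-- A's loop, started with any accumulated inner dict, produces: finish the current run
-- (folding the takeWhile prefix into `inner`), then B's run scan on the remainder.
theorem loopA_eq (rest : List (Int × String)) (key : Int) (inner : List (String × String))
    (listd : List (List (String × String))) :
    loopA key rest inner listd =
      listd ++ ((rest.takeWhile (fun p => p.1 == key)).foldl
          (fun acc p => insKV acc (kvOf p.2).1 (kvOf p.2).2) inner)
        :: altBuild (rest.dropWhile (fun p => p.1 == key)) := by
  induction rest generalizing key inner listd with
  | nil => simp [loopA, altBuild_nil]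
  | cons hd tl ih =>
      obtain ⟨k2, s2⟩ := hd
      by_cases h : key = k2
      · subst h
        simp only [loopA, BEq.rfl, if_true]
        rw [ih]
        simp [List.takeWhile, List.dropWhile]
      · have hb : (key == k2) = false := beq_eq_false_iff_ne.mpr h
        have hb2 : (k2 == key) = false := beq_eq_false_iff_ne.mpr (Ne.symm h)
        simp only [loopA, hb, Bool.false_eq_true, if_false]
        rw [ih k2]
        simp only [List.takeWhile_cons, List.dropWhile_cons, hb2, Bool.false_eq_true, if_false]
        rw [altBuild_cons]
        simp [List.append_assoc]

-- ===== VERDICT (by name: the statement is the Claim_ definition above) =====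
theorem append_dict_spec : Claim_equal_append_dict := by
  intro parent_key lvl dictionary _ hpre
  obtain ⟨hne, -⟩ := hpre
  unfold Spec_append_dict
  cases lvl with
  | nil => exact absurd rfl hne
  | cons hd rest =>
      obtain ⟨key, s⟩ := hd
      simp only [append_dict, append_dict_alt]
      rw [loopA_eq, altBuild_cons]
      simp
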